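-- pv_equiv track=rewrite | github.com/zam29/ConsistentEstimation | ConsistentEstimators/Multi_UI.py | split_target_list_into_pairs
-- ===== SOURCE A (Python) =====
-- def split_target_list_into_pairs(target_list):
--     """
--     input : ['A', 'E', 'W', 'AVG', 'B', 'AVG', 'C']   #[Avg, C]
--     target_list : TYPE
--         DESCRIPTION.
--
--     Returns
--     -------
--     target[['A', 'E', 'W'], ['AVG', 'B'], ['AVG', 'C']]
--
--     """
--     agg_keywords =  ["AVG", "SUM", "COUNT"]
--     # Find the index of the first occurrence of any aggregation keyword
--     keyword_indexes = []
--     for keyword in agg_keywords: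
--         for i in range(0, len(target_list)):
--             if target_list[i] == keyword:
--                 keyword_indexes.append(i)
--             #min(target_list.index(keyword))
--     # Split the list based on the index
--     if len(keyword_indexes) == 0:
--         return [target_list]
--     first_part = target_list[:keyword_indexes[0]]
--     remaining_part = target_list[keyword_indexes[0]:]
--     # Group the remaining list in pairs
--     remaining_pairs = [remaining_part[i:i+2] for i in range(0, len(remaining_part), 2)]
--     # Combine the first part with the remaining pairs
--     if first_part:
--         target_list_of_list = [first_part] + remaining_pairs
--     else:
--         target_list_of_list =  remaining_pairs
--     return target_list_of_list
-- ===== SOURCE B (Python) =====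
-- def _pairs(rest):
--     # build the pair groups back-to-front from the end of the list
--     out = []
--     hi = len(rest)
--     while hi > 0:
--         lo = hi - 1 if hi % 2 else hi - 2
--         out.append(rest[lo:hi])
--         hi = lo
--     out.reverse()
--     return out
--
--
-- def split_target_list_into_pairs(target_list):
--     # Hash index of the FIRST position of every token, built in one pass,
--     # replacing A's per-keyword full-list scans.
--     first_at = {}
--     for i, tok in enumerate(target_list):
--         first_at.setdefault(tok, i)
--     for kw in ("AVG", "SUM", "COUNT"):
--         if kw in first_at:
--             idx = first_at[kw]
--             head = [target_list[:idx]] if idx else []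
--             return head + _pairs(target_list[idx:])
--     return [target_list]
-- ===== Notes on version B (the rewrite author's own statement) =====
-- stated objective: alternative
-- what changed: B builds a hash index of first occurrences in one enumerate pass (A's three full-list index-collecting scans disappear), selects the split position by keyword priority from that index, and assembles the pair groups back-to-front from the end of the list instead of A's forward range-stepped slice comprehension.
import Mathlib
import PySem

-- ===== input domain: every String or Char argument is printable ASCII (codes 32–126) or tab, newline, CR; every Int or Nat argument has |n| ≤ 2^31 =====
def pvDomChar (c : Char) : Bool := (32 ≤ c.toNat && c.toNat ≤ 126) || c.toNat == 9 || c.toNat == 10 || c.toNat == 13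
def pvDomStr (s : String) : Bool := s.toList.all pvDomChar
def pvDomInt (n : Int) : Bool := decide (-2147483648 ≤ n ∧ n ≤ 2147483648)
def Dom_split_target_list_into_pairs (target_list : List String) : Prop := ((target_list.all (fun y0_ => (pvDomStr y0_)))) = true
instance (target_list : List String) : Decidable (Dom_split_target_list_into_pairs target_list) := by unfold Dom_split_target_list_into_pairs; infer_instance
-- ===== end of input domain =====

-- B builds a hash index of first occurrences in one enumerate pass (replacing A's
-- per-keyword full-list index-collecting scans), picks the split position by keyword
-- priority from that index, and assembles the pair groups recursively instead of
-- A's range-stepped slice comprehension (objective: alternative).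

-- ===== PORT A =====
def split_target_list_into_pairs (target_list : List String) : List (List String) :=
  let agg_keywords : List String := ["AVG", "SUM", "COUNT"]
  -- for keyword in agg_keywords: for i in range(0, len(target_list)): if target_list[i] == keyword: append i
  let keyword_indexes : List Int :=
    agg_keywords.foldl (fun acc keyword =>
      (PySem.List.pyRange 0 (PySem.List.len target_list) 1).foldl (fun acc i =>
        if PySem.List.pyGetD target_list i "" = keyword then acc ++ [i] else acc) acc) []
  if PySem.List.len keyword_indexes = 0 then [target_list]
  else
    let k0 : Int := PySem.List.pyGetD keyword_indexes 0 0
    let first_part := PySem.List.slice target_list none (some k0)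
    let remaining_part := PySem.List.slice target_list (some k0) none
    let remaining_pairs := (PySem.List.pyRange 0 (PySem.List.len remaining_part) 2).map
      (fun i => PySem.List.slice remaining_part (some i) (some (i + 2)))
    if first_part ≠ [] then [first_part] ++ remaining_pairs else remaining_pairs

-- ===== PORT B =====
-- '_pairs': 'while hi > 0: lo = hi-1 if hi%2 else hi-2; out.append(rest[lo:hi]); hi = lo'
-- (rest[lo:hi] with 0 ≤ lo ≤ hi is exactly (rest.drop lo).take (hi - lo), cf. PySem.List.slice_toNat)
-- 'lo = hi - 1 if hi % 2 else hi - 2'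
def pvLo (hi : Nat) : Nat := if hi % 2 = 1 then hi - 1 else hi - 2

def pvPairsLoop (rest : List String) (hi : Nat) (out : List (List String)) : List (List String) :=
  if _h : hi > 0 then
    pvPairsLoop rest (pvLo hi) (out ++ [(rest.drop (pvLo hi)).take (hi - pvLo hi)])
  else out
termination_by hi
decreasing_by unfold pvLo; split <;> omega

-- 'out.reverse(); return out'
def pvPairsB (rest : List String) : List (List String) :=
  (pvPairsLoop rest rest.length []).reverse

-- 'first_at = {}; for i, tok in enumerate(target_list): first_at.setdefault(tok, i)'
def pvFirstAt (target_list : List String) : PySem.Dict String Int :=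
  (PySem.List.enumerate target_list).foldl (fun d p => d.setdefault p.2 p.1) PySem.Dict.empty

-- 'for kw in (...): if kw in first_at: …'  (priority walk over the keyword tuple)
def pvSelect (target_list : List String) (first_at : PySem.Dict String Int) :
    List String → List (List String)
  | [] => [target_list]
  | kw :: kws =>
      if first_at.contains kw then
        let idx := first_at.getD kw 0
        (if idx ≠ 0 then [PySem.List.slice target_list none (some idx)] else [])
          ++ pvPairsB (PySem.List.slice target_list (some idx) none)
      else pvSelect target_list first_at kws

def split_target_list_into_pairs_alt (target_list : List String) : List (List String) :=
  pvSelect target_list (pvFirstAt target_list) ["AVG", "SUM", "COUNT"]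

-- ===== PRECONDITION & SPEC =====
def Spec_split_target_list_into_pairs (target_list : List String) (out : List (List String)) : Prop := out = split_target_list_into_pairs_alt target_list
instance (target_list : List String) (out : List (List String)) : Decidable (Spec_split_target_list_into_pairs target_list out) := by unfold Spec_split_target_list_into_pairs; infer_instance

-- ===== CLAIM (what is proved, stated in full; the proofs are below) =====
def Claim_equal_split_target_list_into_pairs : Prop := ∀ (target_list : List String), Dom_split_target_list_into_pairs target_list → Spec_split_target_list_into_pairs target_list (split_target_list_into_pairs target_list)

-- ===== LEMMAS AND PROOFS =====

-- proof-side: the pair groups, taken front-to-back two at a time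
def pvChunk2 : List String → List (List String)
  | [] => []
  | [a] => [[a]]
  | a :: b :: rest => [a, b] :: pvChunk2 rest

theorem pvChunk2_append_even (l m : List String) (h : l.length % 2 = 0) :
    pvChunk2 (l ++ m) = pvChunk2 l ++ pvChunk2 m := by
  induction l using pvChunk2.induct with
  | case1 => simp [pvChunk2]
  | case2 a => simp at h
  | case3 a b rest ih =>
    have : rest.length % 2 = 0 := by simp only [List.length_cons] at h; omega
    simp only [List.cons_append, pvChunk2, ih this]

theorem pvChunk2_short (m : List String) (h1 : m ≠ []) (h2 : m.length ≤ 2) :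
    pvChunk2 m = [m] := by
  match m with
  | [a] => rfl
  | [a, b] => rfl
  | a :: b :: c :: r => simp at h2

-- loop invariant: B's back-to-front loop emits the reversed chunks of rest.take hi
theorem pvPairsLoop_eq (rest : List String) :
    ∀ hi, hi ≤ rest.length → ∀ out,
      pvPairsLoop rest hi out = out ++ (pvChunk2 (rest.take hi)).reverse := by
  intro hi
  induction hi using Nat.strong_induction_on with
  | _ hi ih =>
    intro hhi out
    rw [pvPairsLoop.eq_def]
    by_cases h : hi > 0
    · rw [dif_pos h]
      have hlt : pvLo hi < hi := by unfold pvLo; split <;> omega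
      have heven : pvLo hi % 2 = 0 := by unfold pvLo; split <;> omega
      have hband : 1 ≤ hi - pvLo hi ∧ hi - pvLo hi ≤ 2 := by unfold pvLo; split <;> omega
      set lo := pvLo hi with hlodef
      rw [ih lo hlt (le_trans (le_of_lt hlt) hhi)]
      have hsplit : rest.take hi = rest.take lo ++ (rest.drop lo).take (hi - lo) := by
        rw [show hi = lo + (hi - lo) by omega, List.take_add]
        congr 2
        omega
      have hlen : (rest.take lo).length % 2 = 0 := by
        rw [List.length_take, Nat.min_eq_left (le_trans (le_of_lt hlt) hhi)]
        exact heven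
      have hseg : pvChunk2 ((rest.drop lo).take (hi - lo)) = [(rest.drop lo).take (hi - lo)] := by
        refine pvChunk2_short _ ?_ ?_
        · have hl : ((rest.drop lo).take (hi - lo)).length = hi - lo := by
            rw [List.length_take, List.length_drop]
            omega
          intro hnil
          rw [hnil] at hl
          simp at hl
          omega
        · rw [List.length_take]
          omega
      rw [hsplit, pvChunk2_append_even _ _ hlen, hseg]
      simp
    · rw [dif_neg h]
      have : hi = 0 := by omega
      subst this
      simp [pvChunk2]

theorem pvPairsB_eq (rem : List String) : pvPairsB rem = pvChunk2 rem := by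
  rw [pvPairsB, pvPairsLoop_eq rem rem.length le_rfl []]
  simp

-- B's dict of first occurrences looks up as list-index-of (first match), Int-cast
theorem pvFirstAt_get?_gen (tl : List String) (kw : String) :
    ∀ (s : Int) (d : PySem.Dict String Int),
      ((PySem.List.enumerate tl s).foldl (fun d p => d.setdefault p.2 p.1) d).get? kw
        = ((d.get? kw).or ((PySem.List.index? tl kw).map (fun n => s + (n : Int)))) := by
  induction tl with
  | nil => intro s d; simp [PySem.List.enumerate, PySem.List.index?]
  | cons x xs ih =>
    intro s d
    rw [PySem.List.enumerate_cons, List.foldl_cons, ih]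
    by_cases hc : d.contains x
    · rw [PySem.Dict.setdefault_of_contains _ _ hc]
      rw [PySem.Dict.contains_eq_isSome_get?] at hc
      by_cases hx : x = kw
      · subst hx
        rcases Option.isSome_iff_exists.mp hc with ⟨v, hv⟩
        simp [hv]
      · rw [PySem.List.index?_cons_of_ne _ hx]
        congr 1
        rcases hixs : PySem.List.index? xs kw with _ | n
        · rfl
        · simp
          omega
    · rw [PySem.Dict.setdefault_of_not_contains _ _ (by simpa using hc)]
      by_cases hx : x = kw
      · subst hx
        rw [PySem.Dict.get?_insert_self, PySem.List.index?_cons_self]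
        have hd : d.get? x = none := by
          rw [PySem.Dict.contains_eq_isSome_get?] at hc
          exact Option.not_isSome_iff_eq_none.mp (by simpa using hc)
        simp [hd]
      · rw [PySem.Dict.get?_insert_of_ne _ _ (fun h => hx h.symm),
          PySem.List.index?_cons_of_ne _ hx]
        congr 1
        rcases hixs : PySem.List.index? xs kw with _ | n
        · rfl
        · simp
          omega

theorem pvFirstAt_get? (tl : List String) (kw : String) :
    (pvFirstAt tl).get? kw = (PySem.List.index? tl kw).map (fun n => (n : Int)) := by
  rw [pvFirstAt, pvFirstAt_get?_gen]
  simp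

theorem pvFirstAt_contains (tl : List String) (kw : String) :
    (pvFirstAt tl).contains kw = decide (kw ∈ tl) := by
  rw [PySem.Dict.contains_eq_isSome_get?, pvFirstAt_get?]
  rcases h : PySem.List.index? tl kw with _ | n
  · rw [PySem.List.index?_eq_none_iff] at h; simp [h]
  · have : kw ∈ tl := (PySem.List.index?_isSome_iff tl kw).mp (by rw [h]; rfl)
    simp [this]

-- positions (in order) at which kw occurs in tl
def pvIdxs (tl : List String) (kw : String) : List Nat :=
  (List.range tl.length).filter (fun k => decide (tl.getD k "" = kw))

theorem pvIdxs_cons (a : String) (tl : List String) (kw : String) :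
    pvIdxs (a :: tl) kw = (if a = kw then [0] else []) ++ (pvIdxs tl kw).map (· + 1) := by
  unfold pvIdxs
  rw [List.length_cons, List.range_succ_eq_map, List.filter_cons, List.filter_map]
  by_cases h : a = kw <;> simp [h, Function.comp_def] <;> rfl

theorem pvIdxs_head (tl : List String) (kw : String) :
    (pvIdxs tl kw).head? = PySem.List.index? tl kw := by
  induction tl with
  | nil => simp [pvIdxs, PySem.List.index?]
  | cons a tl ih =>
    rw [pvIdxs_cons]
    by_cases h : a = kw
    · subst h; rw [PySem.List.index?_cons_self]; simp
    · rw [PySem.List.index?_cons_of_ne _ h]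
      simp [h, List.head?_map, ih]

theorem pvIdxs_eq_nil_iff (tl : List String) (kw : String) :
    pvIdxs tl kw = [] ↔ kw ∉ tl := by
  rw [← List.head?_eq_none_iff, pvIdxs_head, PySem.List.index?_eq_none_iff]

-- A's filtered range of indices is pvIdxs, cast to Int
theorem pvFilter_eq (tl : List String) (kw : String) :
    ((PySem.List.pyRange 0 (PySem.List.len tl) 1).filter
        (fun i => decide (PySem.List.pyGetD tl i "" = kw)))
      = List.map (fun (k : Nat) => (k : Int)) (pvIdxs tl kw) := by
  rw [PySem.List.len_eq, PySem.List.pyRange_zero_natCast, List.filter_map]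
  unfold pvIdxs
  refine congrArg (List.map _) (List.filter_congr ?_)
  intro k _
  simp

-- the whole double loop of A, as the concatenated per-keyword index lists
theorem pvKI_eq (tl : List String) :
    (["AVG", "SUM", "COUNT"] : List String).foldl (fun acc keyword =>
        (PySem.List.pyRange 0 (PySem.List.len tl) 1).foldl (fun acc i =>
          if PySem.List.pyGetD tl i "" = keyword then acc ++ [i] else acc) acc) []
      = List.map (fun (k : Nat) => (k : Int))
          (pvIdxs tl "AVG" ++ pvIdxs tl "SUM" ++ pvIdxs tl "COUNT") := by
  rw [List.foldl_cons, List.foldl_cons, List.foldl_cons, List.foldl_nil,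
    PySem.List.foldl_append_ite_eq_filter, PySem.List.foldl_append_ite_eq_filter,
    PySem.List.foldl_append_ite_eq_filter, pvFilter_eq, pvFilter_eq, pvFilter_eq,
    List.nil_append, List.map_append, List.map_append]

-- B's priority walk, expressed as the head of the concatenated per-keyword index lists
theorem pvSelect_eq_head (tl : List String) :
    pvSelect tl (pvFirstAt tl) ["AVG", "SUM", "COUNT"]
      = match (pvIdxs tl "AVG" ++ pvIdxs tl "SUM" ++ pvIdxs tl "COUNT").head? with
        | none => [tl]
        | some idx =>
            (if (idx : Int) ≠ 0 then [PySem.List.slice tl none (some (idx : Int))] else [])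
              ++ pvPairsB (PySem.List.slice tl (some (idx : Int)) none) := by
  have hsel : ∀ kw kws, pvSelect tl (pvFirstAt tl) (kw :: kws)
      = if kw ∈ tl then
          match PySem.List.index? tl kw with
          | none => [tl]   -- unreachable branch when kw ∈ tl
          | some idx =>
              (if (idx : Int) ≠ 0 then [PySem.List.slice tl none (some (idx : Int))] else [])
                ++ pvPairsB (PySem.List.slice tl (some (idx : Int)) none)
        else pvSelect tl (pvFirstAt tl) kws := by
    intro kw kws
    rw [pvSelect, pvFirstAt_contains]
    by_cases h : kw ∈ tl
    · have hs : (PySem.List.index? tl kw).isSome := (PySem.List.index?_isSome_iff tl kw).mpr h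
      rcases Option.isSome_iff_exists.mp hs with ⟨n, hn⟩
      have hg : (pvFirstAt tl).getD kw 0 = (n : Int) := by
        rw [PySem.Dict.getD_eq_get?_getD, pvFirstAt_get?, hn]; rfl
      simp only [h, decide_true, if_true, hn, hg]
    · simp [h]
  rw [hsel, hsel, hsel, pvSelect]
  by_cases h1 : "AVG" ∈ tl
  · have h : pvIdxs tl "AVG" ≠ [] := by rw [Ne, pvIdxs_eq_nil_iff]; simpa using h1
    rcases List.exists_cons_of_ne_nil h with ⟨x, xs, hx⟩
    have hi : PySem.List.index? tl "AVG" = some x := by rw [← pvIdxs_head, hx]; rfl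
    rw [if_pos h1, hi, hx]
    simp only [List.cons_append, List.head?_cons]
  · have h1' : pvIdxs tl "AVG" = [] := (pvIdxs_eq_nil_iff _ _).2 h1
    rw [if_neg h1, h1', List.nil_append]
    by_cases h2 : "SUM" ∈ tl
    · have h : pvIdxs tl "SUM" ≠ [] := by rw [Ne, pvIdxs_eq_nil_iff]; simpa using h2
      rcases List.exists_cons_of_ne_nil h with ⟨x, xs, hx⟩
      have hi : PySem.List.index? tl "SUM" = some x := by rw [← pvIdxs_head, hx]; rfl
      rw [if_pos h2, hi, hx]
      simp only [List.cons_append, List.head?_cons]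
    · have h2' : pvIdxs tl "SUM" = [] := (pvIdxs_eq_nil_iff _ _).2 h2
      rw [if_neg h2, h2', List.nil_append]
      by_cases h3 : "COUNT" ∈ tl
      · have h : pvIdxs tl "COUNT" ≠ [] := by rw [Ne, pvIdxs_eq_nil_iff]; simpa using h3
        rcases List.exists_cons_of_ne_nil h with ⟨x, xs, hx⟩
        have hi : PySem.List.index? tl "COUNT" = some x := by rw [← pvIdxs_head, hx]; rfl
        rw [if_pos h3, hi, hx]
        simp only [List.head?_cons]
      · have h3' : pvIdxs tl "COUNT" = [] := (pvIdxs_eq_nil_iff _ _).2 h3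
        rw [if_neg h3, h3']
        rfl

theorem pvHead_lt (tl : List String) (kw : String) (idx : Nat)
    (h : PySem.List.index? tl kw = some idx) : idx < tl.length := by
  obtain ⟨hk, _, _⟩ := PySem.List.getElem_of_index?_eq_some h
  exact hk

-- range(0, m, 2) as a mapped Nat range
theorem pvRange_two (m : Nat) :
    PySem.List.pyRange 0 (m : Int) 2 = (List.range ((m + 1) / 2)).map (fun k => ((2 * k : Nat) : Int)) := by
  rw [PySem.List.pyRange_of_pos 0 _ (by norm_num)]
  have hc : (if (0 : Int) < m then (((m : Int) - 0 + 2 - 1) / 2).toNat else 0) = (m + 1) / 2 := by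
    split <;> omega
  rw [hc]
  apply List.map_congr_left
  intro k _
  push_cast
  ring

-- pvChunk2 as a Nat-range comprehension of drop/take
theorem pvChunk2_eq_ranges (rem : List String) :
    (List.range ((rem.length + 1) / 2)).map (fun k => (rem.drop (2 * k)).take 2) = pvChunk2 rem := by
  induction rem using pvChunk2.induct with
  | case1 => rfl
  | case2 a => simp [pvChunk2]
  | case3 a b rest ih =>
    have hlen : ((a :: b :: rest).length + 1) / 2 = (rest.length + 1) / 2 + 1 := by
      simp only [List.length_cons]; omega
    rw [hlen, List.range_succ_eq_map, List.map_cons, List.map_map, pvChunk2]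
    refine List.cons_eq_cons.mpr ⟨rfl, ?_⟩
    rw [← ih]
    apply List.map_congr_left
    intro k _
    simp only [Function.comp_apply]
    rw [show 2 * Nat.succ k = 2 * k + 1 + 1 from by omega, List.drop_succ_cons,
      List.drop_succ_cons]

-- the range-stepped slice comprehension of A computes pvChunk2
theorem pvPairs_eq (rem : List String) :
    (PySem.List.pyRange 0 (PySem.List.len rem) 2).map
        (fun i => PySem.List.slice rem (some i) (some (i + 2)))
      = pvChunk2 rem := by
  rw [PySem.List.len_eq, pvRange_two, List.map_map, ← pvChunk2_eq_ranges]
  apply List.map_congr_left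
  intro k _
  have hb : ((2 * k : Nat) : Int) + 2 = ((2 * k + 2 : Nat) : Int) := by push_cast; ring
  simp only [Function.comp_apply, hb]
  rw [PySem.List.slice_toNat _ (by positivity) (by positivity), Int.toNat_natCast, Int.toNat_natCast]
  congr 1
  omega

-- ===== VERDICT (by name: the statement is the Claim_ definition above) =====
theorem split_target_list_into_pairs_spec : Claim_equal_split_target_list_into_pairs := by
  intro tl _
  show split_target_list_into_pairs tl = split_target_list_into_pairs_alt tl
  simp only [split_target_list_into_pairs]
  rw [pvKI_eq]
  rw [show split_target_list_into_pairs_alt tl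
      = pvSelect tl (pvFirstAt tl) ["AVG", "SUM", "COUNT"] from rfl, pvSelect_eq_head]
  by_cases hk : pvIdxs tl "AVG" ++ pvIdxs tl "SUM" ++ pvIdxs tl "COUNT" = []
  · rw [hk]
    simp [PySem.List.len_eq]
  · rcases List.exists_cons_of_ne_nil hk with ⟨h0, t0, hcons⟩
    have hlt : h0 < tl.length := by
      rcases hh : pvIdxs tl "AVG" with _ | ⟨x, xs⟩
      · rcases hh2 : pvIdxs tl "SUM" with _ | ⟨y, ys⟩
        · rcases hh3 : pvIdxs tl "COUNT" with _ | ⟨z, zs⟩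
          · rw [hh, hh2, hh3] at hcons; simp at hcons
          · rw [hh, hh2, hh3] at hcons
            simp only [List.nil_append, List.cons.injEq] at hcons
            rw [← hcons.1]
            exact pvHead_lt tl "COUNT" z (by rw [← pvIdxs_head, hh3]; rfl)
        · rw [hh, hh2] at hcons
          simp only [List.nil_append, List.cons_append, List.cons.injEq] at hcons
          rw [← hcons.1]
          exact pvHead_lt tl "SUM" y (by rw [← pvIdxs_head, hh2]; rfl)
      · rw [hh] at hcons
        simp only [List.cons_append, List.cons.injEq] at hcons
        rw [← hcons.1]
        exact pvHead_lt tl "AVG" x (by rw [← pvIdxs_head, hh]; rfl)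
    rw [hcons]
    rw [if_neg (show ¬(PySem.List.len (List.map (fun (k : Nat) => (k : Int)) (h0 :: t0)) = 0) by
      simp only [PySem.List.len_eq, List.map_cons, List.length_cons]; omega)]
    simp only [List.map_cons, PySem.List.pyGetD_zero_cons, List.head?_cons,
      PySem.List.slice_to_natCast, PySem.List.slice_from_natCast, pvPairs_eq, pvPairsB_eq]
    by_cases h0z : h0 = 0
    · subst h0z
      simp
    · have htake : List.take h0 tl ≠ [] := by
        intro h
        rcases List.take_eq_nil_iff.mp h with h | h
        · exact h0z h
        · rw [h] at hlt; simp at hlt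
      rw [if_pos htake, if_pos (show ((h0 : Nat) : Int) ≠ 0 by exact_mod_cast h0z)]
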